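-- pv_equiv track=rewrite | github.com/rkdalsdn94/algoalgo | programmers/Lv2/지게차와_크레인.py | find_accessible_containers
-- ===== SOURCE A (Python) =====
-- from collections import deque
--
-- def find_accessible_containers(board, n, m):
--     # 상하좌우 이동 방향
--     dx = [0, 1, 0, -1]
--     dy = [1, 0, -1, 0]
--
--     # 외부 공간을 표시할 배열, 1: 외부 공간, 0: 컨테이너 또는 미방문 영역
--     outside = [[0] * m for _ in range(n)]
--     # 접근 가능 컨테이너 표시 배열
--     accessible = [[0] * m for _ in range(n)]
--     # 바깥 테두리에서 BFS 시작 (가장자리가 전부 외부 공간이라고 가정)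
--     q = deque()
--
--     # 가상의 외부 공간 시작점 (가장자리)
--     # 위쪽과 아래쪽 가장자리
--     for j in range(m):
--         if board[0][j] == '0':  # 빈 공간이면 외부 공간으로 표시
--             q.append((0, j))
--             outside[0][j] = 1
--         else:  # 컨테이너면 접근 가능
--             accessible[0][j] = 1
--
--         if board[n-1][j] == '0':
--             q.append((n-1, j))
--             outside[n-1][j] = 1
--         else:
--             accessible[n-1][j] = 1
--
--     # 왼쪽과 오른쪽 가장자리
--     for i in range(1, n-1):
--         if board[i][0] == '0':
--             q.append((i, 0))
--             outside[i][0] = 1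
--         else:
--             accessible[i][0] = 1
--
--         if board[i][m-1] == '0':
--             q.append((i, m-1))
--             outside[i][m-1] = 1
--         else:
--             accessible[i][m-1] = 1
--
--     # BFS로 외부 공간 탐색
--     while q:
--         x, y = q.popleft()
--
--         for i in range(4):
--             nx, ny = x + dx[i], y + dy[i]
--
--             # 범위 내이고 아직 방문하지 않은 빈 공간('0')
--             if 0 <= nx < n and 0 <= ny < m and not outside[nx][ny] and board[nx][ny] == '0':
--                 q.append((nx, ny))
--                 outside[nx][ny] = 1
--
--     # 외부 공간과 접하는 컨테이너 찾기
--     for x in range(n):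
--         for y in range(m):
--             if board[x][y] != '0':  # 컨테이너인 경우
--                 # 상하좌우 확인해서 외부 공간과 접하는지 확인
--                 for i in range(4):
--                     nx, ny = x + dx[i], y + dy[i]
--
--                     if 0 <= nx < n and 0 <= ny < m and outside[nx][ny]:
--                         accessible[x][y] = 1
--                         break
--
--     return accessible
-- ===== SOURCE B (Python) =====
-- from collections import deque
--
-- def find_accessible_containers(board, n, m):
--     # Same border setup as the reference (identical cell order), but the
--     # accessibility marking is fused into the flood fill: when an outside
--     # cell is dequeued, its container neighbours are marked directly, so
--     # the separate final scan over the whole grid disappears.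
--     outside = [[0] * m for _ in range(n)]
--     accessible = [[0] * m for _ in range(n)]
--     q = deque()
--
--     border = []
--     for j in range(m):
--         border.append((0, j))
--         border.append((n - 1, j))
--     for i in range(1, n - 1):
--         border.append((i, 0))
--         border.append((i, m - 1))
--
--     for (i, j) in border:
--         if board[i][j] == '0':
--             q.append((i, j))
--             outside[i][j] = 1
--         else:
--             accessible[i][j] = 1
--
--     while q:
--         x, y = q.popleft()
--         for nx, ny in ((x, y + 1), (x + 1, y), (x, y - 1), (x - 1, y)):
--             if 0 <= nx < n and 0 <= ny < m:
--                 if board[nx][ny] != '0':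
--                     accessible[nx][ny] = 1
--                 elif not outside[nx][ny]:
--                     q.append((nx, ny))
--                     outside[nx][ny] = 1
--
--     return accessible
-- ===== Notes on version B (the rewrite author's own statement) =====
-- stated objective: simpler
-- what changed: B fuses accessibility marking into the flood fill itself (each dequeued outside cell marks its container neighbours) and drives the identical border setup from an explicit border-coordinate list, so A's separate final double loop over the whole grid disappears.
import Mathlib
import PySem

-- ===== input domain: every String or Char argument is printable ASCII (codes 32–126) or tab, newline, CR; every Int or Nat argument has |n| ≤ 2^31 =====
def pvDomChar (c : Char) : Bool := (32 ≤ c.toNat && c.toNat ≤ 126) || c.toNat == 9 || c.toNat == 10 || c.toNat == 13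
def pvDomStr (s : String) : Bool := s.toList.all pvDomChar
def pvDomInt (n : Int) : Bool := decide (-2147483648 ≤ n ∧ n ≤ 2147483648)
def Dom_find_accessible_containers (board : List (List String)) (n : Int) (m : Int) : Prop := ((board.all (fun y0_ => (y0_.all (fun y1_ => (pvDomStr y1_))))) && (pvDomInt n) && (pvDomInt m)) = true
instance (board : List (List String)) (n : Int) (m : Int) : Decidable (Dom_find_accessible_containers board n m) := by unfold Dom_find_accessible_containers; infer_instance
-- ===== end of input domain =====

-- B fuses the accessibility marking into the flood fill (each dequeued outside
-- cell marks its container neighbours) instead of A's separate final grid scan;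
-- objective: simpler (the whole final double loop disappears).

-- ===== shared grid helpers (same code in both Pythons) =====
-- grid[x][y] read with default (all reads are in range under Pre_)
def gget (g : List (List Int)) (x y : Int) : Int := (g.getD x.toNat []).getD y.toNat 0

-- grid[x][y] = 1
def gset1 (g : List (List Int)) (x y : Int) : List (List Int) :=
  g.set x.toNat ((g.getD x.toNat []).set y.toNat 1)

-- board[x][y]
def bget (b : List (List String)) (x y : Int) : String := (b.getD x.toNat []).getD y.toNat ""

-- [[0]*m for _ in range(n)]
def mkgrid (n m : Int) : List (List Int) := List.replicate n.toNat (List.replicate m.toNat 0)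

-- the four (dx, dy) direction pairs, in the order A's dx/dy arrays produce them
def dirs : List (Int × Int) := [(0, 1), (1, 0), (0, -1), (-1, 0)]

-- one border cell: enqueue + mark outside if empty, else mark accessible
-- (the identical statement pair of both Pythons' border setup)
def bStep (board : List (List String))
    (st : List (Int × Int) × List (List Int) × List (List Int)) (c : Int × Int) :
    List (Int × Int) × List (List Int) × List (List Int) :=
  if bget board c.1 c.2 = "0" then (st.1 ++ [c], gset1 st.2.1 c.1 c.2, st.2.2)
  else (st.1, st.2.1, gset1 st.2.2 c.1 c.2)

-- ===== PORT A =====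
-- one direction of A's BFS body
def stepA (board : List (List String)) (n m x y : Int)
    (st : List (Int × Int) × List (List Int)) (d : Int × Int) :
    List (Int × Int) × List (List Int) :=
  if 0 ≤ x + d.1 ∧ x + d.1 < n ∧ 0 ≤ y + d.2 ∧ y + d.2 < m ∧
      gget st.2 (x + d.1) (y + d.2) = 0 ∧ bget board (x + d.1) (y + d.2) = "0" then
    (st.1 ++ [(x + d.1, y + d.2)], gset1 st.2 (x + d.1) (y + d.2))
  else st

-- A's 'while q' loop (fuel only makes the loop total; the wrapper passes enough)
def bfsA (board : List (List String)) (n m : Int) :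
    Nat → List (Int × Int) → List (List Int) → List (List Int)
  | 0, _, out => out
  | _ + 1, [], out => out
  | fuel + 1, c :: rest, out =>
    let st := dirs.foldl (stepA board n m c.1 c.2) (rest, out)
    bfsA board n m fuel st.1 st.2

-- A's two border loops
def setupA (board : List (List String)) (n m : Int) :
    List (Int × Int) × List (List Int) × List (List Int) :=
  let st1 := (PySem.List.pyRange 0 m 1).foldl
    (fun st j => bStep board (bStep board st (0, j)) (n - 1, j))
    ([], mkgrid n m, mkgrid n m)
  (PySem.List.pyRange 1 (n - 1) 1).foldl
    (fun st i => bStep board (bStep board st (i, 0)) (i, m - 1)) st1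

-- A's final double loop ('break' = the bounded ∃ over the 4 directions)
def scanA (board : List (List String)) (n m : Int) (out acc : List (List Int)) :
    List (List Int) :=
  (PySem.List.pyRange 0 n 1).foldl (fun acc x =>
    (PySem.List.pyRange 0 m 1).foldl (fun acc y =>
      if bget board x y ≠ "0" ∧ ∃ d ∈ dirs, 0 ≤ x + d.1 ∧ x + d.1 < n ∧
          0 ≤ y + d.2 ∧ y + d.2 < m ∧ gget out (x + d.1) (y + d.2) ≠ 0 then
        gset1 acc x y
      else acc) acc) acc

def find_accessible_containers (board : List (List String)) (n : Int) (m : Int) :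
    List (List Int) :=
  let s := setupA board n m
  scanA board n m (bfsA board n m (n.toNat * m.toNat + s.1.length) s.1 s.2.1) s.2.2

-- ===== PORT B =====
-- B's explicit border-coordinate list
def borderList (n m : Int) : List (Int × Int) :=
  (PySem.List.pyRange 0 m 1).foldl (fun l j => l ++ [((0 : Int), j), (n - 1, j)]) []
  ++ (PySem.List.pyRange 1 (n - 1) 1).foldl (fun l i => l ++ [(i, (0 : Int)), (i, m - 1)]) []

def setupB (board : List (List String)) (n m : Int) :
    List (Int × Int) × List (List Int) × List (List Int) :=
  (borderList n m).foldl (bStep board) ([], mkgrid n m, mkgrid n m)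

-- one direction of B's fused BFS body
def stepB (board : List (List String)) (n m x y : Int)
    (st : List (Int × Int) × List (List Int) × List (List Int)) (d : Int × Int) :
    List (Int × Int) × List (List Int) × List (List Int) :=
  if 0 ≤ x + d.1 ∧ x + d.1 < n ∧ 0 ≤ y + d.2 ∧ y + d.2 < m then
    if bget board (x + d.1) (y + d.2) ≠ "0" then
      (st.1, st.2.1, gset1 st.2.2 (x + d.1) (y + d.2))
    else if gget st.2.1 (x + d.1) (y + d.2) = 0 then
      (st.1 ++ [(x + d.1, y + d.2)], gset1 st.2.1 (x + d.1) (y + d.2), st.2.2)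
    else st
  else st

-- B's 'while q' loop (fuel only makes the loop total; the wrapper passes enough)
def bfsB (board : List (List String)) (n m : Int) :
    Nat → List (Int × Int) → List (List Int) → List (List Int) →
    List (List Int) × List (List Int)
  | 0, _, out, acc => (out, acc)
  | _ + 1, [], out, acc => (out, acc)
  | fuel + 1, c :: rest, out, acc =>
    let st := dirs.foldl (stepB board n m c.1 c.2) (rest, out, acc)
    bfsB board n m fuel st.1 st.2.1 st.2.2

def find_accessible_containers_alt (board : List (List String)) (n : Int) (m : Int) :
    List (List Int) :=
  let s := setupB board n m
  (bfsB board n m (n.toNat * m.toNat + s.1.length) s.1 s.2.1 s.2.2).2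

-- ===== PRECONDITION & SPEC =====
-- Pre_ admits exactly the inputs on which the Python A returns: a proper grid
-- (n, m ≥ 1, at least n rows each of length ≥ m) or the degenerate no-column
-- case (m ≤ 0 with n ≤ 2) in which A's loops never touch the board; on every
-- other input A raises IndexError.
def Pre_find_accessible_containers (board : List (List String)) (n : Int) (m : Int) : Prop :=
  (1 ≤ n ∧ 1 ≤ m ∧ n.toNat ≤ board.length ∧
    ∀ row ∈ board.take n.toNat, m.toNat ≤ row.length)
  ∨ (n ≤ 2 ∧ m ≤ 0)

instance (board : List (List String)) (n : Int) (m : Int) :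
    Decidable (Pre_find_accessible_containers board n m) := by
  unfold Pre_find_accessible_containers; infer_instance

def pvWitness_find_accessible_containers : List (List String) × Int × Int :=
  ([["1", "0", "1"], ["1", "0", "1"], ["1", "1", "1"]], 3, 3)

def Spec_find_accessible_containers (board : List (List String)) (n : Int) (m : Int) (out : List (List Int)) : Prop := out = find_accessible_containers_alt board n m
instance (board : List (List String)) (n : Int) (m : Int) (out : List (List Int)) : Decidable (Spec_find_accessible_containers board n m out) := by unfold Spec_find_accessible_containers; infer_instance

-- ===== CLAIM (what is proved, stated in full; the proofs are below) =====
def Claim_equal_find_accessible_containers : Prop := ∀ (board : List (List String)) (n : Int) (m : Int), Dom_find_accessible_containers board n m → Pre_find_accessible_containers board n m → Spec_find_accessible_containers board n m (find_accessible_containers board n m)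

-- ===== LEMMAS AND PROOFS =====

-- cell in range
abbrev inR (n m : Int) (c : Int × Int) : Prop := 0 ≤ c.1 ∧ c.1 < n ∧ 0 ≤ c.2 ∧ c.2 < m

-- an n×m grid
def Dims (n m : Int) (g : List (List Int)) : Prop :=
  g.length = n.toNat ∧ ∀ r ∈ g, r.length = m.toNat

def cells (n m : Int) : List (Int × Int) :=
  PySem.List.pyRange 0 n 1 ×ˢ PySem.List.pyRange 0 m 1

-- number of cells not yet marked outside (BFS measure)
def unvis (n m : Int) (g : List (List Int)) : Nat :=
  (cells n m).countP (fun c => decide (gget g c.1 c.2 = 0))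

lemma gget_gset1_of_ne (g : List (List Int)) (x y a b : Int)
    (h : ¬(x.toNat = a.toNat ∧ y.toNat = b.toNat)) :
    gget (gset1 g x y) a b = gget g a b := by
  unfold gget gset1
  by_cases hx : x.toNat = a.toNat
  · have hy : ¬ y.toNat = b.toNat := by tauto
    simp only [List.getD_eq_getElem?_getD, List.getElem?_set, hx]
    by_cases hlt : a.toNat < g.length
    · simp [hlt, hy]
    · simp [hlt]
  · simp [List.getD_eq_getElem?_getD, hx]

lemma gget_gset1_cases (g : List (List Int)) (x y a b : Int) :
    gget (gset1 g x y) a b = gget g a b ∨ gget (gset1 g x y) a b = 1 := by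
  by_cases h : x.toNat = a.toNat ∧ y.toNat = b.toNat
  · obtain ⟨h1, h2⟩ := h
    unfold gget gset1
    rw [← h1, ← h2]
    by_cases hlt : x.toNat < g.length
    · by_cases hy : y.toNat < (g.getD x.toNat []).length
      · right
        rw [List.getD_eq_getElem?_getD, List.getElem?_eq_getElem hlt] at hy
        simp only [List.getD_eq_getElem?_getD, List.getElem?_set]
        simp only [hlt, if_pos trivial, Option.getD_some]
        rw [List.getElem?_set_self (by rw [List.getElem?_eq_getElem hlt]; simpa using hy)]
        rfl
      · left
        rw [List.getD_eq_getElem?_getD] at hy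
        simp only [List.getD_eq_getElem?_getD, List.getElem?_set]
        simp only [hlt, if_pos trivial, Option.getD_some]
        rw [List.getElem?_eq_none (by simpa using hy), List.getElem?_eq_none (by simpa using hy)]
    · left
      rw [List.set_eq_of_length_le (by omega)]
  · left; exact gget_gset1_of_ne g x y a b h

lemma Dims_gset1 (n m : Int) (g : List (List Int)) (x y : Int) (h : Dims n m g) :
    Dims n m (gset1 g x y) := by
  obtain ⟨h1, h2⟩ := h
  by_cases hlt : x.toNat < g.length
  · refine ⟨by simp [gset1, h1], ?_⟩
    intro r hr
    rcases List.mem_or_eq_of_mem_set hr with hm | rfl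
    · exact h2 r hm
    · rw [List.length_set]
      have hrow : g.getD x.toNat [] ∈ g := by
        rw [List.getD_eq_getElem?_getD, List.getElem?_eq_getElem hlt]
        exact List.getElem_mem hlt
      exact h2 _ hrow
  · unfold gset1
    rw [List.set_eq_of_length_le (by omega)]
    exact ⟨h1, h2⟩

lemma Dims_mkgrid (n m : Int) : Dims n m (mkgrid n m) := by
  refine ⟨by simp [mkgrid], ?_⟩
  intro r hr
  simp [mkgrid] at hr
  simp [hr.2]

lemma gget_mkgrid (n m a b : Int) : gget (mkgrid n m) a b = 0 := by
  unfold gget mkgrid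
  simp only [List.getD_eq_getElem?_getD, List.getElem?_replicate]
  split_ifs <;> simp [List.getElem?_replicate]
  split_ifs <;> simp

lemma gget_gset1_inR_self (n m : Int) (g : List (List Int)) (c : Int × Int)
    (hD : Dims n m g) (hc : inR n m c) : gget (gset1 g c.1 c.2) c.1 c.2 = 1 := by
  obtain ⟨h1, h2⟩ := hD
  obtain ⟨hc1, hc2, hc3, hc4⟩ := hc
  have hlt : c.1.toNat < g.length := by omega
  have hrow : g.getD c.1.toNat [] ∈ g := by
    rw [List.getD_eq_getElem?_getD, List.getElem?_eq_getElem hlt]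
    exact List.getElem_mem hlt
  have hrl : (g.getD c.1.toNat []).length = m.toNat := h2 _ hrow
  have hy : c.2.toNat < (g.getD c.1.toNat []).length := by omega
  rw [List.getD_eq_getElem?_getD, List.getElem?_eq_getElem hlt] at hy
  unfold gget gset1
  simp only [List.getD_eq_getElem?_getD, List.getElem?_set]
  simp only [hlt, if_pos trivial, Option.getD_some]
  rw [List.getElem?_set_self (by rw [List.getElem?_eq_getElem hlt]; simpa using hy)]
  rfl

lemma gget_gset1_inR_ne (n m : Int) (g : List (List Int)) (c' c : Int × Int)
    (hc' : inR n m c') (hc : inR n m c) (hne : c ≠ c') :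
    gget (gset1 g c'.1 c'.2) c.1 c.2 = gget g c.1 c.2 := by
  apply gget_gset1_of_ne
  intro ⟨e1, e2⟩
  apply hne
  obtain ⟨a1, a2, a3, a4⟩ := hc; obtain ⟨b1, b2, b3, b4⟩ := hc'
  have : c.1 = c'.1 := by omega
  have : c.2 = c'.2 := by omega
  exact Prod.ext (by omega) (by omega)

lemma mem_cells (n m : Int) (c : Int × Int) : c ∈ cells n m ↔ inR n m c := by
  obtain ⟨a, b⟩ := c
  simp only [cells, List.mem_product, PySem.List.mem_pyRange_one, inR]
  constructor
  · intro ⟨⟨h1, h2⟩, h3, h4⟩; exact ⟨h1, h2, h3, h4⟩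
  · intro ⟨h1, h2, h3, h4⟩; exact ⟨⟨h1, h2⟩, h3, h4⟩

lemma nodup_cells (n m : Int) : (cells n m).Nodup :=
  List.Nodup.product (PySem.List.nodup_pyRange_one 0 n) (PySem.List.nodup_pyRange_one 0 m)

lemma unvis_le (n m : Int) (g : List (List Int)) : unvis n m g ≤ n.toNat * m.toNat := by
  refine le_trans List.countP_le_length ?_
  simp [cells, List.length_product, PySem.List.length_pyRange_one]

lemma countP_set_flip {α : Type} (l : List α) (p q : α → Bool) (a : α)
    (ha : a ∈ l) (hnd : l.Nodup) (hpa : p a = true) (hqa : q a = false)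
    (hother : ∀ b ∈ l, b ≠ a → q b = p b) : l.countP q + 1 = l.countP p := by
  induction l with
  | nil => cases ha
  | cons x t ih =>
    have hx := List.nodup_cons.mp hnd
    rcases List.mem_cons.mp ha with rfl | hat
    · have : t.countP q = t.countP p := by
        apply List.countP_congr
        intro b hb
        rw [hother b (List.mem_cons_of_mem _ hb) (fun hba => hx.1 (hba ▸ hb))]
      simp [hpa, hqa, this]
    · have hha : x ≠ a := by
        rintro rfl; exact hx.1 hat
      have hqp : q x = p x := hother x List.mem_cons_self hha
      have := ih hat hx.2 (fun b hb hba => hother b (List.mem_cons_of_mem _ hb) hba)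
      simp only [List.countP_cons, hqp]
      omega

lemma unvis_gset1 (n m : Int) (g : List (List Int)) (c : Int × Int)
    (hD : Dims n m g) (hc : inR n m c) (h0 : gget g c.1 c.2 = 0) :
    unvis n m (gset1 g c.1 c.2) + 1 = unvis n m g := by
  apply countP_set_flip (cells n m) _ _ c ((mem_cells n m c).mpr hc) (nodup_cells n m)
  · simpa using h0
  · simp [gget_gset1_inR_self n m g c hD hc]
  · intro b hb hba
    simp [gget_gset1_inR_ne n m g c b hc ((mem_cells n m b).mp hb) hba]

lemma foldl_stepA_mono (board : List (List String)) (n m x y : Int)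
    (ds : List (Int × Int)) (st : List (Int × Int) × List (List Int)) (a b : Int)
    (h : gget st.2 a b ≠ 0) :
    gget (ds.foldl (stepA board n m x y) st).2 a b ≠ 0 := by
  induction ds generalizing st with
  | nil => exact h
  | cons d ds ih =>
    apply ih
    unfold stepA
    split_ifs with hc
    · rcases gget_gset1_cases st.2 (x + d.1) (y + d.2) a b with he | he <;> simp [he, h]
    · exact h

lemma bfsA_mono (board : List (List String)) (n m : Int) (fuel : Nat)
    (q : List (Int × Int)) (out : List (List Int)) (a b : Int)
    (h : gget out a b ≠ 0) : gget (bfsA board n m fuel q out) a b ≠ 0 := by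
  induction fuel generalizing q out with
  | zero => exact h
  | succ fuel ih =>
    cases q with
    | nil => exact h
    | cons c rest =>
      simp only [bfsA]
      exact ih _ _ (foldl_stepA_mono board n m c.1 c.2 dirs (rest, out) a b h)

lemma step12 (board : List (List String)) (n m x y : Int)
    (st : List (Int × Int) × List (List Int) × List (List Int)) (d : Int × Int) :
    ((stepB board n m x y st d).1, (stepB board n m x y st d).2.1)
      = stepA board n m x y (st.1, st.2.1) d := by
  unfold stepB stepA
  by_cases h1 : 0 ≤ x + d.1 ∧ x + d.1 < n ∧ 0 ≤ y + d.2 ∧ y + d.2 < m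
  · by_cases h2 : bget board (x + d.1) (y + d.2) = "0"
    · by_cases h3 : gget st.2.1 (x + d.1) (y + d.2) = 0
      · simp [h1, h2, h3]
      · simp [h1, h2, h3]
    · simp [h1, h2]
  · simp only [if_neg h1]
    rw [if_neg (by tauto)]

lemma fold12 (board : List (List String)) (n m x y : Int) (ds : List (Int × Int)) :
    ∀ st : List (Int × Int) × List (List Int) × List (List Int),
    ((ds.foldl (stepB board n m x y) st).1, (ds.foldl (stepB board n m x y) st).2.1)
      = ds.foldl (stepA board n m x y) (st.1, st.2.1) := by
  induction ds with
  | nil => intro st; rfl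
  | cons d ds ih =>
    intro st
    simp only [List.foldl_cons]
    rw [ih, step12]

lemma stepB_dims (board : List (List String)) (n m x y : Int)
    (st : List (Int × Int) × List (List Int) × List (List Int)) (d : Int × Int)
    (h1 : Dims n m st.2.1) (h2 : Dims n m st.2.2) :
    Dims n m (stepB board n m x y st d).2.1 ∧ Dims n m (stepB board n m x y st d).2.2 := by
  unfold stepB
  split_ifs <;> exact ⟨by first | exact Dims_gset1 _ _ _ _ _ h1 | exact h1,
    by first | exact Dims_gset1 _ _ _ _ _ h2 | exact h2⟩

lemma foldl_stepB_dims (board : List (List String)) (n m x y : Int)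
    (ds : List (Int × Int)) :
    ∀ st : List (Int × Int) × List (List Int) × List (List Int),
    Dims n m st.2.1 → Dims n m st.2.2 →
    Dims n m (ds.foldl (stepB board n m x y) st).2.1 ∧
      Dims n m (ds.foldl (stepB board n m x y) st).2.2 := by
  induction ds with
  | nil => intro st h1 h2; exact ⟨h1, h2⟩
  | cons d ds ih =>
    intro st h1 h2
    obtain ⟨g1, g2⟩ := stepB_dims board n m x y st d h1 h2
    exact ih _ g1 g2

lemma bfsB_dims (board : List (List String)) (n m : Int) (fuel : Nat) :
    ∀ (q : List (Int × Int)) (out acc : List (List Int)),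
    Dims n m out → Dims n m acc → Dims n m (bfsB board n m fuel q out acc).2 := by
  induction fuel with
  | zero => intro q out acc _ h2; exact h2
  | succ fuel ih =>
    intro q out acc h1 h2
    cases q with
    | nil => exact h2
    | cons c rest =>
      simp only [bfsB]
      obtain ⟨g1, g2⟩ := foldl_stepB_dims board n m c.1 c.2 dirs (rest, out, acc) h1 h2
      exact ih _ _ _ g1 g2

lemma dirs_pairwise (x y : Int) :
    dirs.Pairwise (fun d d' => (x + d.1, y + d.2) ≠ (x + d'.1, y + d'.2)) := by
  refine List.Pairwise.cons ?_ (List.Pairwise.cons ?_ (List.Pairwise.cons ?_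
    (List.pairwise_singleton _ _))) <;> intro d hd <;>
    simp only [List.mem_cons, List.not_mem_nil, or_false] at hd <;>
    (rcases hd with rfl | rfl | rfl | rfl) <;> simp [Prod.ext_iff]

lemma nbr_symm (x y a b : Int) :
    (∃ d ∈ dirs, (a, b) = (x + d.1, y + d.2)) ↔ (∃ d ∈ dirs, (x, y) = (a + d.1, b + d.2)) := by
  simp only [dirs, List.mem_cons, List.not_mem_nil, or_false, Prod.mk.injEq,
    exists_eq_or_imp, exists_eq_left]
  constructor <;> intro h <;> omega

lemma foldB_spec (board : List (List String)) (n m x y : Int) :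
    ∀ (ds : List (Int × Int)),
    ds.Pairwise (fun d d' => (x + d.1, y + d.2) ≠ (x + d'.1, y + d'.2)) →
    ∀ (q : List (Int × Int)) (out acc : List (List Int)),
    Dims n m out → Dims n m acc →
    (Dims n m (ds.foldl (stepB board n m x y) (q, out, acc)).2.1 ∧
      Dims n m (ds.foldl (stepB board n m x y) (q, out, acc)).2.2)
    ∧ (ds.foldl (stepB board n m x y) (q, out, acc)).1.length
        + unvis n m (ds.foldl (stepB board n m x y) (q, out, acc)).2.1
        = q.length + unvis n m out
    ∧ (∀ c : Int × Int, (c ∈ (ds.foldl (stepB board n m x y) (q, out, acc)).1 ↔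
        c ∈ q ∨ ∃ d ∈ ds, c = (x + d.1, y + d.2) ∧ inR n m c ∧
          gget out c.1 c.2 = 0 ∧ bget board c.1 c.2 = "0"))
    ∧ (∀ c : Int × Int, inR n m c →
        (gget (ds.foldl (stepB board n m x y) (q, out, acc)).2.1 c.1 c.2 ≠ 0 ↔
          gget out c.1 c.2 ≠ 0 ∨ ∃ d ∈ ds, c = (x + d.1, y + d.2) ∧
            gget out c.1 c.2 = 0 ∧ bget board c.1 c.2 = "0"))
    ∧ (∀ c : Int × Int, inR n m c →
        gget (ds.foldl (stepB board n m x y) (q, out, acc)).2.2 c.1 c.2 =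
          if bget board c.1 c.2 ≠ "0" ∧ ∃ d ∈ ds, c = (x + d.1, y + d.2) then 1
          else gget acc c.1 c.2) := by
  intro ds
  induction ds with
  | nil =>
    intro _ q out acc h1 h2
    exact ⟨⟨h1, h2⟩, rfl, fun c => by simp, fun c _ => by simp, fun c _ => by simp⟩
  | cons d ds ih =>
    intro hpw q out acc h1 h2
    obtain ⟨hhead, htail⟩ := List.pairwise_cons.mp hpw
    have hnetd : ∀ d' ∈ ds, ∀ c : Int × Int, c = (x + d'.1, y + d'.2) →
        c ≠ (x + d.1, y + d.2) := by
      intro d' hd' c he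
      rw [he]
      exact Ne.symm (hhead d' hd')
    simp only [List.foldl_cons]
    by_cases hG : 0 ≤ x + d.1 ∧ x + d.1 < n ∧ 0 ≤ y + d.2 ∧ y + d.2 < m
    · have hiRtd : inR n m (x + d.1, y + d.2) := hG
      by_cases hB : bget board (x + d.1) (y + d.2) ≠ "0"
      · -- in range, container neighbour: only acc is marked
        have hstep : stepB board n m x y (q, out, acc) d
            = (q, out, gset1 acc (x + d.1) (y + d.2)) := by
          unfold stepB; rw [if_pos hG, if_pos hB]
        rw [hstep]
        obtain ⟨hD', hM', hQ', hO', hA'⟩ :=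
          ih htail q out (gset1 acc (x + d.1) (y + d.2)) h1 (Dims_gset1 _ _ _ _ _ h2)
        refine ⟨hD', hM', ?_, ?_, ?_⟩
        · intro c
          rw [hQ' c]
          apply or_congr_right
          constructor
          · rintro ⟨d', hd', he, hr, h0, hb⟩
            exact ⟨d', List.mem_cons_of_mem _ hd', he, hr, h0, hb⟩
          · rintro ⟨d', hd', he, hr, h0, hb⟩
            rcases List.mem_cons.mp hd' with rfl | hd'
            · subst he; exact absurd hb hB
            · exact ⟨d', hd', he, hr, h0, hb⟩
        · intro c hc
          rw [hO' c hc]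
          apply or_congr_right
          constructor
          · rintro ⟨d', hd', he, h0, hb⟩
            exact ⟨d', List.mem_cons_of_mem _ hd', he, h0, hb⟩
          · rintro ⟨d', hd', he, h0, hb⟩
            rcases List.mem_cons.mp hd' with rfl | hd'
            · subst he; exact absurd hb hB
            · exact ⟨d', hd', he, h0, hb⟩
        · intro c hc
          rw [hA' c hc]
          by_cases hce : c = (x + d.1, y + d.2)
          · have hcont : bget board c.1 c.2 ≠ "0" := by rw [hce]; exact hB
            rw [if_pos (show bget board c.1 c.2 ≠ "0" ∧
              ∃ d' ∈ d :: ds, c = (x + d'.1, y + d'.2) from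
                ⟨hcont, d, List.mem_cons_self, hce⟩)]
            by_cases hex : ∃ d' ∈ ds, c = (x + d'.1, y + d'.2)
            · rw [if_pos ⟨hcont, hex⟩]
            · rw [if_neg (fun h => hex h.2), hce]
              exact gget_gset1_inR_self n m acc _ h2 hiRtd
          · rw [gget_gset1_inR_ne n m acc _ c hiRtd hc hce]
            apply if_congr _ rfl rfl
            constructor
            · rintro ⟨hcont, d', hd', he⟩
              exact ⟨hcont, d', List.mem_cons_of_mem _ hd', he⟩
            · rintro ⟨hcont, d', hd', he⟩
              rcases List.mem_cons.mp hd' with rfl | hd'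
              · exact absurd he hce
              · exact ⟨hcont, d', hd', he⟩
      · have hb0 : bget board (x + d.1) (y + d.2) = "0" := not_ne_iff.mp hB
        by_cases hO0 : gget out (x + d.1) (y + d.2) = 0
        · -- in range, unvisited empty cell: enqueue and mark outside
          have hstep : stepB board n m x y (q, out, acc) d
              = (q ++ [(x + d.1, y + d.2)], gset1 out (x + d.1) (y + d.2), acc) := by
            unfold stepB; rw [if_pos hG, if_neg hB, if_pos hO0]
          rw [hstep]
          obtain ⟨hD', hM', hQ', hO', hA'⟩ :=
            ih htail (q ++ [(x + d.1, y + d.2)]) (gset1 out (x + d.1) (y + d.2)) acc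
              (Dims_gset1 _ _ _ _ _ h1) h2
          have hunv : unvis n m (gset1 out (x + d.1) (y + d.2)) + 1 = unvis n m out :=
            unvis_gset1 n m out _ h1 hiRtd hO0
          have houtc : ∀ c : Int × Int, inR n m c → c ≠ (x + d.1, y + d.2) →
              gget (gset1 out (x + d.1) (y + d.2)) c.1 c.2 = gget out c.1 c.2 :=
            fun c hc hne => gget_gset1_inR_ne n m out _ c hiRtd hc hne
          have hself : gget (gset1 out (x + d.1) (y + d.2)) (x + d.1) (y + d.2) = 1 :=
            gget_gset1_inR_self n m out _ h1 hiRtd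
          have hne1 : gget (gset1 out (x + d.1) (y + d.2)) (x + d.1) (y + d.2) ≠ 0 := by
            rw [hself]; exact one_ne_zero
          refine ⟨hD', ?_, ?_, ?_, ?_⟩
          · rw [hM', List.length_append]
            simp only [List.length_singleton]
            omega
          · intro c
            rw [hQ' c]
            constructor
            · rintro (hq | ⟨d', hd', he, hr, h0, hb⟩)
              · rcases List.mem_append.mp hq with hq | hq
                · exact Or.inl hq
                · have he : c = (x + d.1, y + d.2) := List.mem_singleton.mp hq
                  subst he
                  exact Or.inr ⟨d, List.mem_cons_self, rfl, hiRtd, hO0, hb0⟩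
              · have hce := hnetd d' hd' c he
                rw [houtc c hr hce] at h0
                exact Or.inr ⟨d', List.mem_cons_of_mem _ hd', he, hr, h0, hb⟩
            · rintro (hq | ⟨d', hd', he, hr, h0, hb⟩)
              · exact Or.inl (List.mem_append_left _ hq)
              · rcases List.mem_cons.mp hd' with rfl | hd'
                · exact Or.inl (List.mem_append_right _ (List.mem_singleton.mpr he))
                · have hce := hnetd d' hd' c he
                  exact Or.inr ⟨d', hd', he, hr, by rw [houtc c hr hce]; exact h0, hb⟩
          · intro c hc
            rw [hO' c hc]
            constructor
            · rintro (hno | ⟨d', hd', he, h0, hb⟩)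
              · by_cases hce : c = (x + d.1, y + d.2)
                · subst hce
                  exact Or.inr ⟨d, List.mem_cons_self, rfl, hO0, hb0⟩
                · rw [houtc c hc hce] at hno
                  exact Or.inl hno
              · have hce := hnetd d' hd' c he
                rw [houtc c hc hce] at h0
                exact Or.inr ⟨d', List.mem_cons_of_mem _ hd', he, h0, hb⟩
            · rintro (hno | ⟨d', hd', he, h0, hb⟩)
              · by_cases hce : c = (x + d.1, y + d.2)
                · subst hce
                  exact Or.inl hne1
                · exact Or.inl (by rw [houtc c hc hce]; exact hno)
              · rcases List.mem_cons.mp hd' with rfl | hd'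
                · subst he
                  exact Or.inl hne1
                · have hce := hnetd d' hd' c he
                  exact Or.inr ⟨d', hd', he, by rw [houtc c hc hce]; exact h0, hb⟩
          · intro c hc
            rw [hA' c hc]
            apply if_congr _ rfl rfl
            constructor
            · rintro ⟨hcont, d', hd', he⟩
              exact ⟨hcont, d', List.mem_cons_of_mem _ hd', he⟩
            · rintro ⟨hcont, d', hd', he⟩
              rcases List.mem_cons.mp hd' with rfl | hd'
              · subst he; exact absurd hb0 hcont
              · exact ⟨hcont, d', hd', he⟩
        · -- in range, empty cell already outside: no-op
          have hstep : stepB board n m x y (q, out, acc) d = (q, out, acc) := by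
            unfold stepB; rw [if_pos hG, if_neg hB, if_neg hO0]
          rw [hstep]
          obtain ⟨hD', hM', hQ', hO', hA'⟩ := ih htail q out acc h1 h2
          refine ⟨hD', hM', ?_, ?_, ?_⟩
          · intro c
            rw [hQ' c]
            apply or_congr_right
            constructor
            · rintro ⟨d', hd', he, hr, h0, hb⟩
              exact ⟨d', List.mem_cons_of_mem _ hd', he, hr, h0, hb⟩
            · rintro ⟨d', hd', he, hr, h0, hb⟩
              rcases List.mem_cons.mp hd' with rfl | hd'
              · subst he; exact absurd h0 hO0
              · exact ⟨d', hd', he, hr, h0, hb⟩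
          · intro c hc
            rw [hO' c hc]
            apply or_congr_right
            constructor
            · rintro ⟨d', hd', he, h0, hb⟩
              exact ⟨d', List.mem_cons_of_mem _ hd', he, h0, hb⟩
            · rintro ⟨d', hd', he, h0, hb⟩
              rcases List.mem_cons.mp hd' with rfl | hd'
              · subst he; exact absurd h0 hO0
              · exact ⟨d', hd', he, h0, hb⟩
          · intro c hc
            rw [hA' c hc]
            apply if_congr _ rfl rfl
            constructor
            · rintro ⟨hcont, d', hd', he⟩
              exact ⟨hcont, d', List.mem_cons_of_mem _ hd', he⟩
            · rintro ⟨hcont, d', hd', he⟩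
              rcases List.mem_cons.mp hd' with rfl | hd'
              · subst he; exact absurd hb0 hcont
              · exact ⟨hcont, d', hd', he⟩
    · -- neighbour out of range: no-op
      have hstep : stepB board n m x y (q, out, acc) d = (q, out, acc) := by
        unfold stepB; rw [if_neg hG]
      rw [hstep]
      obtain ⟨hD', hM', hQ', hO', hA'⟩ := ih htail q out acc h1 h2
      refine ⟨hD', hM', ?_, ?_, ?_⟩
      · intro c
        rw [hQ' c]
        apply or_congr_right
        constructor
        · rintro ⟨d', hd', he, hr, h0, hb⟩
          exact ⟨d', List.mem_cons_of_mem _ hd', he, hr, h0, hb⟩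
        · rintro ⟨d', hd', he, hr, h0, hb⟩
          rcases List.mem_cons.mp hd' with rfl | hd'
          · subst he; exact absurd hr hG
          · exact ⟨d', hd', he, hr, h0, hb⟩
      · intro c hc
        rw [hO' c hc]
        apply or_congr_right
        constructor
        · rintro ⟨d', hd', he, h0, hb⟩
          exact ⟨d', List.mem_cons_of_mem _ hd', he, h0, hb⟩
        · rintro ⟨d', hd', he, h0, hb⟩
          rcases List.mem_cons.mp hd' with rfl | hd'
          · subst he; exact absurd hc hG
          · exact ⟨d', hd', he, h0, hb⟩
      · intro c hc
        rw [hA' c hc]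
        apply if_congr _ rfl rfl
        constructor
        · rintro ⟨hcont, d', hd', he⟩
          exact ⟨hcont, d', List.mem_cons_of_mem _ hd', he⟩
        · rintro ⟨hcont, d', hd', he⟩
          rcases List.mem_cons.mp hd' with rfl | hd'
          · subst he; exact absurd hc hG
          · exact ⟨hcont, d', hd', he⟩

lemma if_collapse {p q r : Prop} [Decidable p] [Decidable q] [Decidable r] {a b : Int}
    (h : r ↔ p ∨ q) : (if p then a else if q then a else b) = if r then a else b := by
  split_ifs <;> tauto

lemma bfsB_snd_spec (board : List (List String)) (n m : Int) :
    ∀ (fuel : Nat) (q : List (Int × Int)) (out acc : List (List Int)),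
    Dims n m out → Dims n m acc →
    q.length + unvis n m out ≤ fuel →
    (∀ c ∈ q, inR n m c ∧ gget out c.1 c.2 ≠ 0) →
    ∀ c : Int × Int, inR n m c →
    gget (bfsB board n m fuel q out acc).2 c.1 c.2 =
      if bget board c.1 c.2 ≠ "0" ∧ ∃ d ∈ dirs,
          ((c.1 + d.1, c.2 + d.2) ∈ q ∨
            (inR n m (c.1 + d.1, c.2 + d.2) ∧ gget out (c.1 + d.1) (c.2 + d.2) = 0 ∧
              gget (bfsA board n m fuel q out) (c.1 + d.1) (c.2 + d.2) ≠ 0))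
        then 1 else gget acc c.1 c.2 := by
  intro fuel
  induction fuel with
  | zero =>
    intro q out acc hDo hDa hfuel hq c hc
    have hq0 : q = [] := List.eq_nil_of_length_eq_zero (by omega)
    subst hq0
    rw [if_neg ?hfalse]
    case hfalse =>
      rintro ⟨_, d, hd, hmem | ⟨_, h0, hne⟩⟩
      · exact List.not_mem_nil hmem
      · exact hne h0
    rfl
  | succ fuel ih =>
    intro q out acc hDo hDa hfuel hq c hc
    cases q with
    | nil =>
      rw [if_neg ?hfalse]
      case hfalse =>
        rintro ⟨_, d, hd, hmem | ⟨_, h0, hne⟩⟩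
        · exact List.not_mem_nil hmem
        · exact hne h0
      rfl
    | cons c0 rest =>
      obtain ⟨⟨hD1, hD2⟩, hM, hQ, hO, hA⟩ :=
        foldB_spec board n m c0.1 c0.2 dirs (dirs_pairwise c0.1 c0.2) rest out acc hDo hDa
      have h12 : ((dirs.foldl (stepB board n m c0.1 c0.2) (rest, out, acc)).1, (dirs.foldl (stepB board n m c0.1 c0.2) (rest, out, acc)).2.1)
          = dirs.foldl (stepA board n m c0.1 c0.2) (rest, out) := by
        simpa using fold12 board n m c0.1 c0.2 dirs (rest, out, acc)
      have hbfsA : bfsA board n m (fuel + 1) (c0 :: rest) out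
          = bfsA board n m fuel (dirs.foldl (stepB board n m c0.1 c0.2) (rest, out, acc)).1 (dirs.foldl (stepB board n m c0.1 c0.2) (rest, out, acc)).2.1 := by
        conv_lhs => rw [show bfsA board n m (fuel + 1) (c0 :: rest) out
          = bfsA board n m fuel (dirs.foldl (stepA board n m c0.1 c0.2) (rest, out)).1
              (dirs.foldl (stepA board n m c0.1 c0.2) (rest, out)).2 from rfl]
        rw [← h12]
      have hbfsB : bfsB board n m (fuel + 1) (c0 :: rest) out acc
          = bfsB board n m fuel (dirs.foldl (stepB board n m c0.1 c0.2) (rest, out, acc)).1 (dirs.foldl (stepB board n m c0.1 c0.2) (rest, out, acc)).2.1 (dirs.foldl (stepB board n m c0.1 c0.2) (rest, out, acc)).2.2 := rfl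
      have hmono : ∀ e : Int × Int, gget (dirs.foldl (stepB board n m c0.1 c0.2) (rest, out, acc)).2.1 e.1 e.2 ≠ 0 →
          gget (bfsA board n m fuel (dirs.foldl (stepB board n m c0.1 c0.2) (rest, out, acc)).1 (dirs.foldl (stepB board n m c0.1 c0.2) (rest, out, acc)).2.1) e.1 e.2 ≠ 0 :=
        fun e => bfsA_mono board n m fuel (dirs.foldl (stepB board n m c0.1 c0.2) (rest, out, acc)).1 (dirs.foldl (stepB board n m c0.1 c0.2) (rest, out, acc)).2.1 e.1 e.2
      have hqi : ∀ e ∈ (dirs.foldl (stepB board n m c0.1 c0.2) (rest, out, acc)).1, inR n m e ∧ gget (dirs.foldl (stepB board n m c0.1 c0.2) (rest, out, acc)).2.1 e.1 e.2 ≠ 0 := by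
        intro e he
        rcases (hQ e).mp he with h | ⟨d', hd', he', hr, h0, hb⟩
        · have hh := hq e (List.mem_cons_of_mem _ h)
          exact ⟨hh.1, (hO e hh.1).mpr (Or.inl hh.2)⟩
        · exact ⟨hr, (hO e hr).mpr (Or.inr ⟨d', hd', he', h0, hb⟩)⟩
      have hlen : (dirs.foldl (stepB board n m c0.1 c0.2) (rest, out, acc)).1.length + unvis n m (dirs.foldl (stepB board n m c0.1 c0.2) (rest, out, acc)).2.1 ≤ fuel := by
        have hf := hfuel
        simp only [List.length_cons] at hf
        omega
      rw [hbfsA, hbfsB, ih (dirs.foldl (stepB board n m c0.1 c0.2) (rest, out, acc)).1 (dirs.foldl (stepB board n m c0.1 c0.2) (rest, out, acc)).2.1 (dirs.foldl (stepB board n m c0.1 c0.2) (rest, out, acc)).2.2 hD1 hD2 hlen hqi c hc, hA c hc]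
      apply if_collapse
      constructor
      · rintro ⟨hcont, d, hd, hS0⟩
        rcases hS0 with hmem | ⟨hr, h0, hF⟩
        · rcases List.mem_cons.mp hmem with heq | hmem'
          · right
            refine ⟨hcont, ?_⟩
            have hnb : ∃ d' ∈ dirs, (c0.1, c0.2) = (c.1 + d'.1, c.2 + d'.2) :=
              ⟨d, hd, by rw [← heq]⟩
            obtain ⟨d'', hd'', he''⟩ := (nbr_symm c0.1 c0.2 c.1 c.2).mpr hnb
            exact ⟨d'', hd'', he''⟩
          · exact Or.inl ⟨hcont, d, hd, Or.inl ((hQ _).mpr (Or.inl hmem'))⟩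
        · by_cases hst0 : gget (dirs.foldl (stepB board n m c0.1 c0.2) (rest, out, acc)).2.1 (c.1 + d.1) (c.2 + d.2) = 0
          · exact Or.inl ⟨hcont, d, hd, Or.inr ⟨hr, hst0, hF⟩⟩
          · rcases (hO _ hr).mp hst0 with hout | ⟨d', hd', he', h0', hb'⟩
            · exact absurd h0 hout
            · exact Or.inl ⟨hcont, d, hd,
                Or.inl ((hQ _).mpr (Or.inr ⟨d', hd', he', hr, h0', hb'⟩))⟩
      · rintro (⟨hcont, d, hd, hS1⟩ | ⟨hcont, d', hd', he⟩)
        · refine ⟨hcont, d, hd, ?_⟩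
          rcases hS1 with hmem | ⟨hr, h0, hF⟩
          · rcases (hQ _).mp hmem with hmem' | ⟨d', hd', he', hr', h0', hb'⟩
            · exact Or.inl (List.mem_cons_of_mem _ hmem')
            · exact Or.inr ⟨hr', h0',
                hmono _ ((hO _ hr').mpr (Or.inr ⟨d', hd', he', h0', hb'⟩))⟩
          · have hout0 : gget out (c.1 + d.1) (c.2 + d.2) = 0 := by
              by_contra hno
              exact ((hO _ hr).mpr (Or.inl hno)) h0
            exact Or.inr ⟨hr, hout0, hF⟩
        · refine ⟨hcont, ?_⟩
          obtain ⟨d'', hd'', he''⟩ := (nbr_symm c0.1 c0.2 c.1 c.2).mp ⟨d', hd', he⟩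
          refine ⟨d'', hd'', Or.inl ?_⟩
          rw [← he'']
          exact List.mem_cons_self

lemma setup_eq (board : List (List String)) (n m : Int) :
    setupB board n m = setupA board n m := by
  unfold setupA setupB borderList
  rw [PySem.List.foldl_append_eq_flatMap, PySem.List.foldl_append_eq_flatMap]
  simp only [List.nil_append]
  rw [List.foldl_append, List.foldl_flatMap, List.foldl_flatMap]
  simp only [List.foldl_cons, List.foldl_nil]

lemma mem_borderList_inR (n m : Int) (hn : 1 ≤ n) (hm : 1 ≤ m) (c : Int × Int)
    (hc : c ∈ borderList n m) : inR n m c := by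
  unfold borderList at hc
  rw [PySem.List.foldl_append_eq_flatMap, PySem.List.foldl_append_eq_flatMap] at hc
  simp only [List.nil_append, List.mem_append, List.mem_flatMap,
    PySem.List.mem_pyRange_one, List.mem_cons, List.not_mem_nil, or_false] at hc
  rcases hc with ⟨j, hj, rfl | rfl⟩ | ⟨i, hi, rfl | rfl⟩ <;>
    exact ⟨by omega, by omega, by omega, by omega⟩

lemma bset_spec (board : List (List String)) (n m : Int) :
    ∀ (L : List (Int × Int)),
    (∀ c ∈ L, inR n m c) →
    ∀ (st : List (Int × Int) × List (List Int) × List (List Int)),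
    Dims n m st.2.1 → Dims n m st.2.2 →
    (Dims n m (L.foldl (bStep board) st).2.1 ∧ Dims n m (L.foldl (bStep board) st).2.2)
    ∧ (∀ c : Int × Int, (c ∈ (L.foldl (bStep board) st).1 ↔
        c ∈ st.1 ∨ (c ∈ L ∧ bget board c.1 c.2 = "0")))
    ∧ (∀ c : Int × Int, inR n m c →
        (gget (L.foldl (bStep board) st).2.1 c.1 c.2 ≠ 0 ↔
          gget st.2.1 c.1 c.2 ≠ 0 ∨ (c ∈ L ∧ bget board c.1 c.2 = "0"))) := by
  intro L
  induction L with
  | nil =>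
    intro _ st h1 h2
    exact ⟨⟨h1, h2⟩, fun c => by simp, fun c _ => by simp⟩
  | cons c0 L ih =>
    intro hiR st h1 h2
    have hiR0 : inR n m c0 := hiR c0 List.mem_cons_self
    have hiR' : ∀ c ∈ L, inR n m c := fun c hc => hiR c (List.mem_cons_of_mem _ hc)
    simp only [List.foldl_cons]
    by_cases hb : bget board c0.1 c0.2 = "0"
    · have hstep : bStep board st c0 = (st.1 ++ [c0], gset1 st.2.1 c0.1 c0.2, st.2.2) := by
        unfold bStep; rw [if_pos hb]
      rw [hstep]
      obtain ⟨hDims, hQ, hO⟩ := ih hiR' (st.1 ++ [c0], gset1 st.2.1 c0.1 c0.2, st.2.2)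
        (Dims_gset1 _ _ _ _ _ h1) h2
      refine ⟨hDims, ?_, ?_⟩
      · intro c
        rw [hQ c]
        simp only [List.mem_append, List.mem_cons, List.not_mem_nil, or_false]
        constructor
        · rintro ((h | rfl) | h)
          · exact Or.inl h
          · exact Or.inr ⟨Or.inl rfl, hb⟩
          · exact Or.inr ⟨Or.inr h.1, h.2⟩
        · rintro (h | ⟨rfl | h, hbc⟩)
          · exact Or.inl (Or.inl h)
          · exact Or.inl (Or.inr rfl)
          · exact Or.inr ⟨h, hbc⟩
      · intro c hc
        rw [hO c hc]
        by_cases hce : c = c0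
        · subst hce
          rw [gget_gset1_inR_self n m st.2.1 c h1 hc]
          exact ⟨fun _ => Or.inr ⟨List.mem_cons_self, hb⟩, fun _ => Or.inl one_ne_zero⟩
        · rw [gget_gset1_inR_ne n m st.2.1 c0 c hiR0 hc hce]
          simp only [List.mem_cons]
          constructor
          · rintro (h | h)
            · exact Or.inl h
            · exact Or.inr ⟨Or.inr h.1, h.2⟩
          · rintro (h | ⟨rfl | h, hbc⟩)
            · exact Or.inl h
            · exact absurd rfl hce
            · exact Or.inr ⟨h, hbc⟩
    · have hstep : bStep board st c0 = (st.1, st.2.1, gset1 st.2.2 c0.1 c0.2) := by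
        unfold bStep; rw [if_neg hb]
      rw [hstep]
      obtain ⟨hDims, hQ, hO⟩ := ih hiR' (st.1, st.2.1, gset1 st.2.2 c0.1 c0.2)
        h1 (Dims_gset1 _ _ _ _ _ h2)
      refine ⟨hDims, ?_, ?_⟩
      · intro c
        rw [hQ c]
        simp only [List.mem_cons]
        constructor
        · rintro (h | h)
          · exact Or.inl h
          · exact Or.inr ⟨Or.inr h.1, h.2⟩
        · rintro (h | ⟨rfl | h, hbc⟩)
          · exact Or.inl h
          · exact absurd hbc hb
          · exact Or.inr ⟨h, hbc⟩
      · intro c hc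
        rw [hO c hc]
        simp only [List.mem_cons]
        constructor
        · rintro (h | h)
          · exact Or.inl h
          · exact Or.inr ⟨Or.inr h.1, h.2⟩
        · rintro (h | ⟨rfl | h, hbc⟩)
          · exact Or.inl h
          · exact absurd hbc hb
          · exact Or.inr ⟨h, hbc⟩

lemma scan_fold_spec (n m : Int) (P : Int × Int → Prop) [DecidablePred P] :
    ∀ (L : List (Int × Int)) (acc : List (List Int)),
    Dims n m acc → L.Nodup → (∀ e ∈ L, inR n m e) →
    ∀ c : Int × Int, inR n m c →
    gget (L.foldl (fun a e => if P e then gset1 a e.1 e.2 else a) acc) c.1 c.2 =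
      if c ∈ L ∧ P c then 1 else gget acc c.1 c.2 := by
  intro L
  induction L with
  | nil => intro acc _ _ _ c _; simp
  | cons e L ih =>
    intro acc hD hnd hiR c hc
    have hiRe : inR n m e := hiR e List.mem_cons_self
    have hD' : Dims n m (if P e then gset1 acc e.1 e.2 else acc) := by
      split_ifs
      · exact Dims_gset1 _ _ _ _ _ hD
      · exact hD
    simp only [List.foldl_cons]
    rw [ih _ hD' (List.nodup_cons.mp hnd).2 (fun x hx => hiR x (List.mem_cons_of_mem _ hx)) c hc]
    by_cases hce : c = e
    · subst hce
      have hnc : c ∉ L := (List.nodup_cons.mp hnd).1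
      by_cases hP : P c
      · rw [if_neg (fun h => hnc h.1), if_pos hP, if_pos ⟨List.mem_cons_self, hP⟩]
        exact gget_gset1_inR_self n m acc c hD hc
      · rw [if_neg (fun h => hP h.2), if_neg hP, if_neg (fun h => hP h.2)]
    · have he : gget (if P e then gset1 acc e.1 e.2 else acc) c.1 c.2 = gget acc c.1 c.2 := by
        split_ifs
        · exact gget_gset1_inR_ne n m acc e c hiRe hc hce
        · rfl
      rw [he]
      by_cases hcL : c ∈ L ∧ P c
      · rw [if_pos hcL, if_pos ⟨List.mem_cons_of_mem _ hcL.1, hcL.2⟩]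
      · have : ¬(c ∈ e :: L ∧ P c) := by
          rintro ⟨h1, h2⟩
          rcases List.mem_cons.mp h1 with rfl | h3
          · exact hce rfl
          · exact hcL ⟨h3, h2⟩
        rw [if_neg hcL, if_neg this]

lemma scan_fold_dims (n m : Int) (P : Int × Int → Prop) [DecidablePred P]
    (L : List (Int × Int)) (acc : List (List Int)) (h : Dims n m acc) :
    Dims n m (L.foldl (fun a e => if P e then gset1 a e.1 e.2 else a) acc) := by
  induction L generalizing acc with
  | nil => exact h
  | cons e L ih =>
    simp only [List.foldl_cons]
    by_cases hP : P e
    · exact ih _ (by simp only [if_pos hP]; exact Dims_gset1 _ _ _ _ _ h)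
    · simpa only [if_neg hP] using ih _ h

lemma scanA_eq_fold (board : List (List String)) (n m : Int) (out acc : List (List Int)) :
    scanA board n m out acc = (cells n m).foldl (fun a e =>
      if bget board e.1 e.2 ≠ "0" ∧ ∃ d ∈ dirs, 0 ≤ e.1 + d.1 ∧ e.1 + d.1 < n ∧
          0 ≤ e.2 + d.2 ∧ e.2 + d.2 < m ∧ gget out (e.1 + d.1) (e.2 + d.2) ≠ 0 then
        gset1 a e.1 e.2
      else a) acc := by
  unfold scanA cells
  rw [show (PySem.List.pyRange 0 n 1 ×ˢ PySem.List.pyRange 0 m 1)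
      = (PySem.List.pyRange 0 n 1).flatMap
          (fun x => (PySem.List.pyRange 0 m 1).map (Prod.mk x)) from rfl]
  rw [List.foldl_flatMap]
  apply PySem.List.foldl_congr_mem
  intro a x _
  rw [List.foldl_map]

lemma grid_ext (n m : Int) (g h : List (List Int)) (hg : Dims n m g) (hh : Dims n m h)
    (he : ∀ c : Int × Int, inR n m c → gget g c.1 c.2 = gget h c.1 c.2) : g = h := by
  apply List.ext_getElem (by rw [hg.1, hh.1])
  intro i hi1 hi2
  have hrg : g[i].length = m.toNat := hg.2 _ (List.getElem_mem hi1)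
  have hrh : h[i].length = m.toNat := hh.2 _ (List.getElem_mem hi2)
  apply List.ext_getElem (by rw [hrg, hrh])
  intro j hj1 hj2
  have hn1 : i < n.toNat := hg.1 ▸ hi1
  have hm1 : j < m.toNat := hrg ▸ hj1
  have hin : inR n m ((i : Int), (j : Int)) := ⟨by omega, by omega, by omega, by omega⟩
  have e1 : gget g (i : Int) (j : Int) = g[i][j] := by
    simp only [gget, Int.toNat_natCast, List.getD_eq_getElem?_getD]
    rw [List.getElem?_eq_getElem hi1]
    simp [List.getElem?_eq_getElem hj1]
  have e2 : gget h (i : Int) (j : Int) = h[i][j] := by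
    simp only [gget, Int.toNat_natCast, List.getD_eq_getElem?_getD]
    rw [List.getElem?_eq_getElem hi2]
    simp [List.getElem?_eq_getElem hj2]
  rw [← e1, ← e2]
  exact he _ hin

lemma bfsA_nil_q (board : List (List String)) (n m : Int) (fuel : Nat)
    (out : List (List Int)) : bfsA board n m fuel [] out = out := by
  cases fuel <;> rfl

lemma bfsB_nil_q (board : List (List String)) (n m : Int) (fuel : Nat)
    (out acc : List (List Int)) : bfsB board n m fuel [] out acc = (out, acc) := by
  cases fuel <;> rfl

lemma degenA (board : List (List String)) (n m : Int) (hn2 : n ≤ 2) (hm0 : m ≤ 0) :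
    find_accessible_containers board n m = mkgrid n m := by
  have hrm : PySem.List.pyRange 0 m 1 = [] := PySem.List.pyRange_one_eq_nil (by omega)
  have hrn : PySem.List.pyRange 1 (n - 1) 1 = [] := PySem.List.pyRange_one_eq_nil (by omega)
  have hsetup : setupA board n m = ([], mkgrid n m, mkgrid n m) := by
    unfold setupA
    rw [hrm, hrn]
    simp
  unfold find_accessible_containers
  rw [hsetup]
  simp only [List.length_nil]
  rw [bfsA_nil_q]
  unfold scanA
  rw [hrm]
  simp only [List.foldl_nil]
  rw [List.foldl_fixed]

lemma degenB (board : List (List String)) (n m : Int) (hn2 : n ≤ 2) (hm0 : m ≤ 0) :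
    find_accessible_containers_alt board n m = mkgrid n m := by
  have hrm : PySem.List.pyRange 0 m 1 = [] := PySem.List.pyRange_one_eq_nil (by omega)
  have hrn : PySem.List.pyRange 1 (n - 1) 1 = [] := PySem.List.pyRange_one_eq_nil (by omega)
  have hsetup : setupB board n m = ([], mkgrid n m, mkgrid n m) := by
    unfold setupB borderList
    rw [hrm, hrn]
    simp
  unfold find_accessible_containers_alt
  rw [hsetup]
  simp only [List.length_nil]
  rw [bfsB_nil_q]

-- ===== VERDICT (by name: the statement is the Claim_ definition above) =====
theorem find_accessible_containers_spec : Claim_equal_find_accessible_containers := by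
  intro board n m _ hPre
  unfold Spec_find_accessible_containers
  rcases hPre with ⟨hn, hm, hlen, hrows⟩ | ⟨hn2, hm0⟩
  · -- proper grid
    have hbord : ∀ c ∈ borderList n m, inR n m c :=
      fun c hc => mem_borderList_inR n m hn hm c hc
    obtain ⟨⟨hDo, hDa⟩, hQ0, hO0⟩ := bset_spec board n m (borderList n m) hbord
      ([], mkgrid n m, mkgrid n m) (Dims_mkgrid n m) (Dims_mkgrid n m)
    have hqi : ∀ e ∈ ((borderList n m).foldl (bStep board) ([], mkgrid n m, mkgrid n m)).1, inR n m e ∧ gget ((borderList n m).foldl (bStep board) ([], mkgrid n m, mkgrid n m)).2.1 e.1 e.2 ≠ 0 := by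
      intro e he
      rcases (hQ0 e).mp he with h | ⟨hbm, hb0⟩
      · exact absurd h List.not_mem_nil
      · exact ⟨hbord e hbm, (hO0 e (hbord e hbm)).mpr (Or.inr ⟨hbm, hb0⟩)⟩
    have hfuel : ((borderList n m).foldl (bStep board) ([], mkgrid n m, mkgrid n m)).1.length + unvis n m ((borderList n m).foldl (bStep board) ([], mkgrid n m, mkgrid n m)).2.1
        ≤ n.toNat * m.toNat + ((borderList n m).foldl (bStep board) ([], mkgrid n m, mkgrid n m)).1.length := by
      have := unvis_le n m ((borderList n m).foldl (bStep board) ([], mkgrid n m, mkgrid n m)).2.1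
      omega
    simp only [find_accessible_containers, find_accessible_containers_alt]
    rw [← setup_eq board n m]
    unfold setupB
    refine grid_ext n m _ _ ?_ ?_ ?_
    · rw [scanA_eq_fold]
      exact scan_fold_dims n m _ _ _ hDa
    · exact bfsB_dims board n m _ ((borderList n m).foldl (bStep board) ([], mkgrid n m, mkgrid n m)).1 ((borderList n m).foldl (bStep board) ([], mkgrid n m, mkgrid n m)).2.1 ((borderList n m).foldl (bStep board) ([], mkgrid n m, mkgrid n m)).2.2 hDo hDa
    · intro c hc
      have hcm : c ∈ cells n m := (mem_cells n m c).mpr hc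
      rw [scanA_eq_fold]
      rw [scan_fold_spec n m _ (cells n m) _ hDa (nodup_cells n m)
        (fun e he => (mem_cells n m e).mp he) c hc]
      rw [bfsB_snd_spec board n m (n.toNat * m.toNat + ((borderList n m).foldl (bStep board) ([], mkgrid n m, mkgrid n m)).1.length)
        ((borderList n m).foldl (bStep board) ([], mkgrid n m, mkgrid n m)).1 ((borderList n m).foldl (bStep board) ([], mkgrid n m, mkgrid n m)).2.1 ((borderList n m).foldl (bStep board) ([], mkgrid n m, mkgrid n m)).2.2 hDo hDa hfuel hqi c hc]
      apply if_congr _ rfl rfl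
      constructor
      · rintro ⟨_, hcont, d, hd, h1, h2, h3, h4, hF⟩
        refine ⟨hcont, d, hd, ?_⟩
        by_cases h0 : gget ((borderList n m).foldl (bStep board) ([], mkgrid n m, mkgrid n m)).2.1 (c.1 + d.1) (c.2 + d.2) = 0
        · exact Or.inr ⟨⟨h1, h2, h3, h4⟩, h0, hF⟩
        · rcases (hO0 (c.1 + d.1, c.2 + d.2) ⟨h1, h2, h3, h4⟩).mp h0 with hmk | ⟨hbm, hb0⟩
          · exact absurd (gget_mkgrid n m _ _) hmk
          · exact Or.inl ((hQ0 (c.1 + d.1, c.2 + d.2)).mpr (Or.inr ⟨hbm, hb0⟩))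
      · rintro ⟨hcont, d, hd, hmem | ⟨hr, h0, hF⟩⟩
        · rcases (hQ0 (c.1 + d.1, c.2 + d.2)).mp hmem with h | ⟨hbm, hb0⟩
          · exact absurd h List.not_mem_nil
          · have hr : inR n m (c.1 + d.1, c.2 + d.2) := hbord _ hbm
            have hne : gget ((borderList n m).foldl (bStep board) ([], mkgrid n m, mkgrid n m)).2.1 (c.1 + d.1) (c.2 + d.2) ≠ 0 :=
              (hO0 _ hr).mpr (Or.inr ⟨hbm, hb0⟩)
            exact ⟨hcm, hcont, d, hd, hr.1, hr.2.1, hr.2.2.1, hr.2.2.2,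
              bfsA_mono board n m _ ((borderList n m).foldl (bStep board) ([], mkgrid n m, mkgrid n m)).1 ((borderList n m).foldl (bStep board) ([], mkgrid n m, mkgrid n m)).2.1 _ _ hne⟩
        · exact ⟨hcm, hcont, d, hd, hr.1, hr.2.1, hr.2.2.1, hr.2.2.2, hF⟩
  · -- degenerate no-column case: both sides are the n×0 grid
    rw [degenA board n m hn2 hm0, degenB board n m hn2 hm0]
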